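-- pv_equiv track=rewrite | github.com/EmmaSecrest/algebraBackend | simplify/simplify_monomials.py | simplify_monomials
-- ===== SOURCE A (Python) =====
-- def simplify_monomials(expression):
--     expression = ''.join(sorted(expression))
--
--     result = ''
--     count = 1
--     for i in range(1, len(expression)):
--         if expression[i] == expression[i - 1]:
--             count += 1
--         else:
--             result += expression[i - 1] + ('^' + str(count) if count > 1 else '')
--             count = 1
--     result += expression[-1] + ('^' + str(count) if count > 1 else '')
--     return result
-- ===== SOURCE B (Python) =====
-- def simplify_monomials(expression):
--     counts = {}
--     for ch in expression:
--         counts[ch] = counts.get(ch, 0) + 1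
--     return ''.join(ch + ('^' + str(counts[ch]) if counts[ch] > 1 else '')
--                    for ch in sorted(counts))
-- ===== Notes on version B (the rewrite author's own statement) =====
-- stated objective: faster
-- what changed: Instead of sorting all characters and run-length scanning adjacent pairs with string concatenation, B counts characters in one dict pass and sorts only the distinct keys, emitting each run directly.
import Mathlib
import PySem

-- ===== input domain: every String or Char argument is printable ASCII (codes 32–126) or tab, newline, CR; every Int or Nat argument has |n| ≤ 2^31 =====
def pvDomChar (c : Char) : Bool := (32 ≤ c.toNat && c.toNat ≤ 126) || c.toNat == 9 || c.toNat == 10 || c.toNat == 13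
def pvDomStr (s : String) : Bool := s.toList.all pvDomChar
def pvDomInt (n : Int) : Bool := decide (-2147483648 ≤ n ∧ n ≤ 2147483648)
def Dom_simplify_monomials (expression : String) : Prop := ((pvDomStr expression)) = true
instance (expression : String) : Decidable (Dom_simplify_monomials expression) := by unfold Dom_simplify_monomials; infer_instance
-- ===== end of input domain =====

-- B replaces A's sort-all-characters + adjacent-pair run-length scan by a one-pass
-- character-count dict whose distinct keys are sorted and emitted directly (objective: faster).


-- ===== PORT A =====
def simplify_monomials (expression : String) : String :=
  -- expression = ''.join(sorted(expression))
  let s : List Char := PySem.List.sorted expression.toList (fun c => c) false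
  -- for i in range(1, len(expression)): …  (state = (result, count))
  let p : List Char × Int :=
    (PySem.List.pyRange 1 (PySem.List.len s) 1).foldl
      (fun (acc : List Char × Int) i =>
        if PySem.List.pyGetD s i ' ' = PySem.List.pyGetD s (i - 1) ' ' then
          (acc.1, acc.2 + 1)
        else
          (acc.1 ++ (PySem.List.pyGetD s (i - 1) ' ' ::
             (if acc.2 > 1 then '^' :: PySem.Int.toChars acc.2 else [])), 1))
      ([], 1)
  -- result += expression[-1] + ('^' + str(count) if count > 1 else '')   (expression[-1]: Pre_ excludes "")
  String.ofList (p.1 ++ (PySem.List.pyGetD s (-1) ' ' ::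
    (if p.2 > 1 then '^' :: PySem.Int.toChars p.2 else [])))

-- ===== PORT B =====
def simplify_monomials_alt (expression : String) : String :=
  -- counts = {}; for ch in expression: counts[ch] = counts.get(ch, 0) + 1
  let counts : PySem.Dict Char Int :=
    expression.toList.foldl (fun d c => d.insert c (d.getD c 0 + 1)) PySem.Dict.empty
  -- ''.join(ch + ('^' + str(counts[ch]) if counts[ch] > 1 else '') for ch in sorted(counts))
  String.ofList (PySem.Chars.join []
    ((PySem.List.sorted counts.keys (fun c => c) false).map (fun c =>
      c :: (if counts.getD c 0 > 1 then '^' :: PySem.Int.toChars (counts.getD c 0) else []))))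

-- ===== PRECONDITION & SPEC =====
-- A evaluates expression[-1]: it raises IndexError exactly on the empty string (B returns '' there).
def Pre_simplify_monomials (expression : String) : Prop := expression ≠ ""
instance (expression : String) : Decidable (Pre_simplify_monomials expression) := by
  unfold Pre_simplify_monomials; infer_instance
def pvWitness_simplify_monomials : String := "aabbbc"

def Spec_simplify_monomials (expression : String) (out : String) : Prop :=
  out = simplify_monomials_alt expression
instance (expression : String) (out : String) : Decidable (Spec_simplify_monomials expression out) := by
  unfold Spec_simplify_monomials; infer_instance

-- ===== CLAIM (what is proved, stated in full; the proofs are below) =====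
def Claim_equal_simplify_monomials : Prop := ∀ (expression : String),
  Dom_simplify_monomials expression → Pre_simplify_monomials expression →
  Spec_simplify_monomials expression (simplify_monomials expression)

-- ===== LEMMAS AND PROOFS =====

def pvEmit (c : Char) (n : Int) : List Char :=
  c :: (if n > 1 then '^' :: PySem.Int.toChars n else [])
def pvStep (acc : List Char × Int) (pc : Char × Char) : List Char × Int :=
  if pc.2 = pc.1 then (acc.1, acc.2 + 1) else (acc.1 ++ pvEmit pc.1 acc.2, 1)
def pvAfin : List Char → Char → Int → List Char → List Char
  | [], prev, cnt, res => res ++ pvEmit prev cnt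
  | c :: rest, prev, cnt, res =>
      if c = prev then pvAfin rest prev (cnt + 1) res
      else pvAfin rest c 1 (res ++ pvEmit prev cnt)

theorem pvJoinNil (parts : List (List Char)) : PySem.Chars.join [] parts = parts.flatten := by
  simp only [PySem.Chars.join, List.intercalate]
  induction parts with
  | nil => rfl
  | cons p ps ih => cases ps <;> simp_all [List.intersperse]

theorem pvZipAfin : ∀ (rest : List Char) (prev : Char) (cnt : Int) (res : List Char),
    (let p := (((prev :: rest).zip rest).foldl pvStep (res, cnt));
     p.1 ++ pvEmit (rest.getLastD prev) p.2) = pvAfin rest prev cnt res := by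
  intro rest
  induction rest with
  | nil => intro prev cnt res; simp [pvAfin]
  | cons c r ih =>
    intro prev cnt res
    simp only [List.zip_cons_cons, List.foldl_cons, pvAfin, List.getLastD_cons]
    by_cases h : c = prev
    · subst h
      simpa [pvStep] using ih c (cnt + 1) res
    · simpa [pvStep, h] using ih c 1 (res ++ pvEmit prev cnt)

theorem pvRangeFold (s : List Char) : ∀ (n k : Nat) (acc : List Char × Int),
    s.length ≤ k + 1 + n →
    (PySem.List.pyRange ((k : Int) + 1) (s.length : Int) 1).foldl
      (fun (acc : List Char × Int) i =>
        if PySem.List.pyGetD s i ' ' = PySem.List.pyGetD s (i - 1) ' ' then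
          (acc.1, acc.2 + 1)
        else
          (acc.1 ++ (PySem.List.pyGetD s (i - 1) ' ' ::
             (if acc.2 > 1 then '^' :: PySem.Int.toChars acc.2 else [])), 1)) acc
    = ((s.drop k).zip (s.drop (k + 1))).foldl pvStep acc := by
  intro n
  induction n with
  | zero =>
    intro k acc h
    rw [PySem.List.pyRange_one_eq_nil (by omega)]
    have : s.drop (k+1) = [] := List.drop_eq_nil_of_le (by omega)
    rw [this, List.zip_nil_right]; rfl
  | succ n ih =>
    intro k acc h
    by_cases hk : k + 1 < s.length
    · rw [PySem.List.pyRange_one_cons (by omega)]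
      have h1 : s.drop k = s[k] :: s.drop (k+1) := (List.getElem_cons_drop (by omega)).symm
      have h2 : s.drop (k+1) = s[k+1] :: s.drop (k+2) := (List.getElem_cons_drop (by omega)).symm
      rw [List.foldl_cons, h1, h2, List.zip_cons_cons, List.foldl_cons]
      have e1 : PySem.List.pyGetD s ((k:Int)+1) ' ' = s[k+1] := by
        have := PySem.List.pyGetD_eq_getElem (xs := s) (i := (k:Int)+1) (d := ' ')
          (by omega) (by omega)
        simpa using this
      have e2 : PySem.List.pyGetD s ((k:Int)+1-1) ' ' = s[k] := by
        have := PySem.List.pyGetD_eq_getElem (xs := s) (i := (k:Int)) (d := ' ')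
          (by omega) (by omega)
        simpa using this
      rw [e1]
      have : ((k:Int)+1+1) = ((k+1:Nat):Int)+1 := by push_cast; ring
      rw [this, ih (k+1) _ (by omega), ← h2]
      congr 1
      simp only [pvStep, e2]
      rcases acc with ⟨res, cnt⟩
      by_cases hc : s[k+1] = s[k] <;> simp [hc, pvEmit]
    · rw [PySem.List.pyRange_one_eq_nil (by omega)]
      have : s.drop (k+1) = [] := List.drop_eq_nil_of_le (by omega)
      rw [this, List.zip_nil_right]; rfl

theorem pvAfinSorted : ∀ (rest : List Char) (prev : Char) (cnt : Int) (res : List Char),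
    List.Pairwise (· ≤ ·) rest → (∀ y ∈ rest, prev ≤ y) →
    pvAfin rest prev cnt res = res ++
      (PySem.List.sorted (PySem.Set.ofList (prev :: rest)) (fun c => c) false).flatMap
        (fun c => pvEmit c ((if c = prev then cnt else 0) + rest.count c)) := by
  intro rest
  induction rest with
  | nil =>
    intro prev cnt res _ _
    have hs : PySem.List.sorted (PySem.Set.ofList [prev]) (fun c => c) false = [prev] := by
      have h0 : PySem.Set.ofList [prev] = [prev] := rfl
      rw [h0]
      exact PySem.List.sorted_eq_self_of_pairwise (xs := [prev]) (key := fun c => c) (by constructor <;> simp)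
    simp [pvAfin, hs]
  | cons c r ih =>
    intro prev cnt res hp hall
    have hpc : prev ≤ c := hall c (by simp)
    have hcy : ∀ y ∈ r, c ≤ y := fun y hy => (List.pairwise_cons.mp hp).1 y hy
    have hpr : List.Pairwise (· ≤ ·) r := (List.pairwise_cons.mp hp).2
    by_cases hc : c = prev
    · subst hc
      rw [pvAfin, if_pos rfl, ih c (cnt + 1) res hpr hcy]
      have hperm : (PySem.Set.ofList (c :: r)).Perm (PySem.Set.ofList (c :: c :: r)) := by
        rw [List.perm_ext_iff_of_nodup (PySem.Set.nodup_ofList _) (PySem.Set.nodup_ofList _)]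
        intro x
        rw [PySem.Set.mem_ofList, PySem.Set.mem_ofList]
        simp only [List.mem_cons]
        tauto
      have hsort : PySem.List.sorted (PySem.Set.ofList (c :: r)) (fun c => c) false
          = PySem.List.sorted (PySem.Set.ofList (c :: c :: r)) (fun c => c) false :=
        PySem.List.sorted_eq_sorted_of_perm _ _ _ (fun a b h => h) hperm
      rw [hsort]
      congr 1
      apply List.flatMap_congr
      intro a _
      have hcount : ((if a = c then cnt + 1 else 0) + (r.count a : Int))
          = ((if a = c then cnt else 0) + ((c :: r).count a : Int)) := by
        by_cases hac : a = c
        · simp only [hac, List.count_cons_self]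
          push_cast; ring
        · have hca : c ≠ a := fun h => hac h.symm
          simp [hac, List.count_cons_of_ne hca]
      rw [hcount]
    · have hpc' : prev < c := lt_of_le_of_ne hpc (fun e => hc e.symm)
      have hnotin : prev ∉ c :: r := by
        intro hmem
        rcases List.mem_cons.mp hmem with h | h
        · exact absurd h.symm hc
        · exact absurd (lt_of_lt_of_le hpc' (hcy _ h)) (lt_irrefl prev)
      rw [pvAfin, if_neg hc, ih c 1 (res ++ pvEmit prev cnt) hpr hcy]
      set K' := PySem.List.sorted (PySem.Set.ofList (c :: r)) (fun c => c) false with hK'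
      have hKnodup : K'.Nodup := (PySem.List.sorted_perm _ _ _).symm.nodup (PySem.Set.nodup_ofList _)
      have hKmem : ∀ x, x ∈ K' ↔ x ∈ c :: r := by
        intro x
        rw [hK', PySem.List.mem_sorted, PySem.Set.mem_ofList]
      have hsort : PySem.List.sorted (PySem.Set.ofList (prev :: c :: r)) (fun c => c) false
          = prev :: K' := by
        apply PySem.List.sorted_eq_of_perm_of_pairwise_lt
        · rw [List.perm_ext_iff_of_nodup
            (List.nodup_cons.mpr ⟨fun h => hnotin ((hKmem _).mp h), hKnodup⟩)
            (PySem.Set.nodup_ofList _)]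
          intro x
          simp only [PySem.Set.mem_ofList, List.mem_cons, hKmem x]
        · refine List.pairwise_cons.mpr ⟨?_, ?_⟩
          · intro y hy
            rcases List.mem_cons.mp ((hKmem y).mp hy) with h | h
            · simpa [h] using hpc'
            · exact lt_of_lt_of_le hpc' (hcy _ h)
          · rw [hK']; exact PySem.List.sorted_ofList_pairwise_lt _
      rw [hsort, List.flatMap_cons]
      have hprevcount : (c :: r).count prev = 0 := List.count_eq_zero.mpr hnotin
      have hfprev : pvEmit prev ((if prev = prev then cnt else 0) + ((c :: r).count prev : Int))
          = pvEmit prev cnt := by simp [hprevcount]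
      rw [hfprev, ← List.append_assoc]
      congr 1
      apply List.flatMap_congr
      intro a ha
      have hane : ¬ a = prev := fun e => hnotin (e ▸ (hKmem a).mp ha)
      have hcount : ((if a = c then 1 else 0) + (r.count a : Int))
          = ((if a = prev then cnt else 0) + ((c :: r).count a : Int)) := by
        by_cases hac : a = c
        · simp only [hac, if_neg hc, List.count_cons_self]
          push_cast; ring
        · have hca : c ≠ a := fun h => hac h.symm
          simp [hac, hane, List.count_cons_of_ne hca]
      rw [hcount]

theorem pvA_canon (e : String) (h : e.toList ≠ []) :
    simplify_monomials e = String.ofList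
      ((PySem.List.sorted (PySem.Set.ofList e.toList) (fun c => c) false).flatMap
        (fun c => pvEmit c (e.toList.count c))) := by
  have hsne : PySem.List.sorted e.toList (fun c => c) false ≠ [] := by
    rw [ne_eq, PySem.List.sorted_eq_nil_iff]; exact h
  obtain ⟨x, rest, hxr⟩ := List.exists_cons_of_ne_nil hsne
  have hpw : List.Pairwise (· ≤ ·) (PySem.List.sorted e.toList (fun c => c) false) := by
    simpa using PySem.List.sorted_pairwise e.toList (fun c => c)
  rw [hxr] at hpw hsne
  have hperm : (PySem.List.sorted e.toList (fun c => c) false).Perm e.toList :=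
    PySem.List.sorted_perm _ _ _
  rw [hxr] at hperm
  have hfold : ∀ acc : List Char × Int,
      (PySem.List.pyRange 1 ((x :: rest).length : Int) 1).foldl
        (fun (acc : List Char × Int) i =>
          if PySem.List.pyGetD (x :: rest) i ' ' = PySem.List.pyGetD (x :: rest) (i - 1) ' ' then
            (acc.1, acc.2 + 1)
          else
            (acc.1 ++ (PySem.List.pyGetD (x :: rest) (i - 1) ' ' ::
               (if acc.2 > 1 then '^' :: PySem.Int.toChars acc.2 else [])), 1)) acc
      = ((x :: rest).zip rest).foldl pvStep acc := by
    intro acc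
    have h0 := pvRangeFold (x :: rest) (x :: rest).length 0 acc (by omega)
    simpa using h0
  have hlast : PySem.List.pyGetD (x :: rest) (-1) ' ' = rest.getLastD x := by
    exact (PySem.List.pyGetD_neg_one (xs := x :: rest) (d := ' ') hsne).trans
      (List.getLast_eq_getLastD hsne)
  simp only [simplify_monomials, PySem.List.len_eq, hxr, hfold, hlast]
  have hz := pvZipAfin rest x 1 []
  simp only at hz
  rw [show (((x :: rest).zip rest).foldl pvStep ([], 1)).1 ++
        (rest.getLastD x ::
          (if (((x :: rest).zip rest).foldl pvStep ([], 1)).2 > 1 then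
            '^' :: PySem.Int.toChars (((x :: rest).zip rest).foldl pvStep ([], 1)).2 else []))
      = pvAfin rest x 1 [] from by rw [← hz]; rfl]
  rw [pvAfinSorted rest x 1 [] (List.pairwise_cons.mp hpw).2 (List.pairwise_cons.mp hpw).1,
    List.nil_append]
  congr 1
  have hsortEq : PySem.List.sorted (PySem.Set.ofList (x :: rest)) (fun c => c) false
      = PySem.List.sorted (PySem.Set.ofList e.toList) (fun c => c) false := by
    apply PySem.List.sorted_eq_sorted_of_perm _ _ _ (fun a b hh => hh)
    rw [List.perm_ext_iff_of_nodup (PySem.Set.nodup_ofList _) (PySem.Set.nodup_ofList _)]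
    intro a
    rw [PySem.Set.mem_ofList, PySem.Set.mem_ofList]
    exact ⟨fun ha => hperm.mem_iff.mp ha, fun ha => hperm.mem_iff.mpr ha⟩
  rw [← hsortEq]
  apply List.flatMap_congr
  intro a ha
  have hcnt : (if a = x then (1:Int) else 0) + (rest.count a : Int)
      = ((x :: rest).count a : Int) := by
    by_cases hax : a = x
    · simp [hax, List.count_cons_self]; ring
    · have hxa : x ≠ a := fun hh => hax hh.symm
      simp [hax, List.count_cons_of_ne hxa]
  rw [hcnt, hperm.count_eq]

theorem pvB_canon (e : String) :
    simplify_monomials_alt e = String.ofList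
      ((PySem.List.sorted (PySem.Set.ofList e.toList) (fun c => c) false).flatMap
        (fun c => pvEmit c (e.toList.count c))) := by
  simp only [simplify_monomials_alt, PySem.Dict.keys_foldl_insert,
    PySem.Dict.getD_foldl_insert_add_one, PySem.Dict.getD_empty, PySem.Dict.keys_empty,
    PySem.Set.update_nil_left, pvJoinNil, zero_add]
  rw [← List.flatMap_def]
  apply congrArg
  apply List.flatMap_congr
  intro a ha
  simp [pvEmit]

-- ===== VERDICT (by name: the statement is the Claim_ definition above) =====
theorem simplify_monomials_spec : Claim_equal_simplify_monomials := by
  intro e _ hpre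
  unfold Spec_simplify_monomials
  have h : e.toList ≠ [] := fun hh => hpre (String.toList_eq_nil_iff.mp hh)
  rw [pvA_canon e h, pvB_canon e]
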